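-- pv_equiv track=rewrite | github.com/zalio/word-problem-solver-thesis | number_assigners/num_assigner_tools.py | fix_solution_line_if_necessary
-- ===== SOURCE A (Python) =====
-- def fix_solution_line_if_necessary(solution_line, first_symbol_to_look_for):
--     split_solution_line = solution_line.split(" and ")
--     all_possible_symbols = ["+", "-", "*", "/", "="]
--     all_possible_symbols.remove(first_symbol_to_look_for)
--     if len(split_solution_line) > 1:
--         for i in split_solution_line[0]:
--             if i == first_symbol_to_look_for:
--                 return solution_line
--             elif i in all_possible_symbols:
--                 return split_solution_line[1] + " and " + split_solution_line[0]
--     return solution_line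
-- ===== SOURCE B (Python) =====
-- def fix_solution_line_if_necessary(solution_line, first_symbol_to_look_for):
--     others = ["+", "-", "*", "/", "="]
--     others.remove(first_symbol_to_look_for)
--     parts = solution_line.split(" and ")
--     if len(parts) > 1:
--         head = parts[0]
--         p = next((i for i, c in enumerate(head) if c == first_symbol_to_look_for), len(head))
--         q = next((i for i, c in enumerate(head) if c in others), len(head))
--         if q < p:
--             return parts[1] + " and " + parts[0]
--     return solution_line
-- ===== Notes on version B (the rewrite author's own statement) =====
-- stated objective: alternative
-- what changed: A's single early-returning char-by-char scan with three exits is replaced by computing two first-occurrence indices (of the looked-for symbol and of any other symbol) and comparing them once.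
import Mathlib
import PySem

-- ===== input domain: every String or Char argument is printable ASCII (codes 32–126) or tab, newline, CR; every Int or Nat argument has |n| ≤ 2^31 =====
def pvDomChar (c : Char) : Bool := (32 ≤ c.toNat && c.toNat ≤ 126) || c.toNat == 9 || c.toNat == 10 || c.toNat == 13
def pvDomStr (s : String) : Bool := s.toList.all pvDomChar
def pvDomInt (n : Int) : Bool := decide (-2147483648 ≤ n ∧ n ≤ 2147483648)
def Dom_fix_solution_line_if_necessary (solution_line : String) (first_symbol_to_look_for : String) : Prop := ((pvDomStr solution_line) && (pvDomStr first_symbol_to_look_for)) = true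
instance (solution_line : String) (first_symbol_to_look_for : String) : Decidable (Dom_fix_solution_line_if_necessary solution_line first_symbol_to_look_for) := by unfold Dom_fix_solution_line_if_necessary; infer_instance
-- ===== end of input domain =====

-- B replaces A's early-returning char scan by two first-occurrence indices compared once (objective: alternative decomposition).

-- ===== PORT A =====
-- the for-loop over split_solution_line[0] with its three exits
def pvScanA (chars : List Char) (first : String) (syms : List String) (keep swap : String) : String :=
  match chars with
  | [] => keep
  | c :: rest =>
    if String.ofList [c] == first then keep
    else if syms.contains (String.ofList [c]) then swap
    else pvScanA rest first syms keep swap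

def fix_solution_line_if_necessary (solution_line : String) (first_symbol_to_look_for : String) : String :=
  let split_solution_line := (PySem.Str.split? solution_line " and ").getD []
  match PySem.List.remove? ["+", "-", "*", "/", "="] first_symbol_to_look_for with
  | none => ""   -- ValueError in Python; excluded by Pre_
  | some all_possible_symbols =>
    if split_solution_line.length > 1 then
      pvScanA ((PySem.List.pyGet? split_solution_line 0).getD "").toList first_symbol_to_look_for
        all_possible_symbols solution_line
        ((PySem.List.pyGet? split_solution_line 1).getD "" ++ " and " ++ (PySem.List.pyGet? split_solution_line 0).getD "")
    else solution_line

-- ===== PORT B =====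
def fix_solution_line_if_necessary_alt (solution_line : String) (first_symbol_to_look_for : String) : String :=
  match PySem.List.remove? ["+", "-", "*", "/", "="] first_symbol_to_look_for with
  | none => ""   -- ValueError in Python; excluded by Pre_
  | some others =>
    let parts := (PySem.Str.split? solution_line " and ").getD []
    if parts.length > 1 then
      let head := ((PySem.List.pyGet? parts 0).getD "").toList
      let p := head.findIdx (fun c => String.ofList [c] == first_symbol_to_look_for)
      let q := head.findIdx (fun c => others.contains (String.ofList [c]))
      if q < p then (PySem.List.pyGet? parts 1).getD "" ++ " and " ++ (PySem.List.pyGet? parts 0).getD ""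
      else solution_line
    else solution_line

-- ===== PRECONDITION & SPEC =====
-- Pre_ excludes exactly the inputs where list.remove raises ValueError (first symbol not one of the five)
def Pre_fix_solution_line_if_necessary (solution_line : String) (first_symbol_to_look_for : String) : Prop :=
  first_symbol_to_look_for ∈ ["+", "-", "*", "/", "="]
instance (solution_line : String) (first_symbol_to_look_for : String) : Decidable (Pre_fix_solution_line_if_necessary solution_line first_symbol_to_look_for) := by unfold Pre_fix_solution_line_if_necessary; infer_instance

def pvWitness_fix_solution_line_if_necessary : String × String := ("x = 1 and y - 2", "=")

def Spec_fix_solution_line_if_necessary (solution_line : String) (first_symbol_to_look_for : String) (out : String) : Prop := out = fix_solution_line_if_necessary_alt solution_line first_symbol_to_look_for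
instance (solution_line : String) (first_symbol_to_look_for : String) (out : String) : Decidable (Spec_fix_solution_line_if_necessary solution_line first_symbol_to_look_for out) := by unfold Spec_fix_solution_line_if_necessary; infer_instance

-- ===== CLAIM (what is proved, stated in full; the proofs are below) =====
def Claim_equal_fix_solution_line_if_necessary : Prop := ∀ (solution_line : String) (first_symbol_to_look_for : String), Dom_fix_solution_line_if_necessary solution_line first_symbol_to_look_for → Pre_fix_solution_line_if_necessary solution_line first_symbol_to_look_for → Spec_fix_solution_line_if_necessary solution_line first_symbol_to_look_for (fix_solution_line_if_necessary solution_line first_symbol_to_look_for)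

-- ===== LEMMAS AND PROOFS =====
-- A's scan agrees with B's two-index comparison, for any predicates (overlap included)
theorem pvScanA_eq_findIdx (chars : List Char) (first : String) (syms : List String)
    (keep swap : String) :
    pvScanA chars first syms keep swap =
      (if chars.findIdx (fun c => syms.contains (String.ofList [c])) <
          chars.findIdx (fun c => String.ofList [c] == first) then swap else keep) := by
  induction chars with
  | nil => simp [pvScanA]
  | cons c rest ih =>
    simp only [pvScanA, List.findIdx_cons]
    cases h1 : (String.ofList [c] == first) <;> cases h2 : syms.contains (String.ofList [c]) <;>
      simp [ih]

-- ===== VERDICT (by name: the statement is the Claim_ definition above) =====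
theorem fix_solution_line_if_necessary_spec : Claim_equal_fix_solution_line_if_necessary := by
  intro solution_line first _ _
  unfold Spec_fix_solution_line_if_necessary
  unfold fix_solution_line_if_necessary fix_solution_line_if_necessary_alt
  cases PySem.List.remove? ["+", "-", "*", "/", "="] first with
  | none => rfl
  | some syms =>
    simp only [pvScanA_eq_findIdx]
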